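-- pv_equiv track=rewrite | github.com/EmilStenstrom/justhtml-xss-bench | src/xssbench/cli.py | _normalize_id_args
-- ===== SOURCE A (Python) =====
-- def _normalize_id_args(raw_ids: list[str]) -> list[str]:
--     # Allow either: --ids a b c  OR  --ids a,b,c
--     ids: list[str] = []
--     for item in raw_ids:
--         for part in str(item).split(","):
--             part = part.strip()
--             if part:
--                 ids.append(part)
--     return ids
-- ===== SOURCE B (Python) =====
-- def _normalize_id_args(raw_ids):
--     # Single character-level scan per item: tokens are accumulated directly,
--     # leading/trailing whitespace never enters a token, so no split()/strip() calls.
--     ids = []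
--     for item in raw_ids:
--         cur = []    # characters of the current token (left-stripped as built)
--         pend = []   # whitespace buffered inside a token, flushed on next non-space
--         for c in str(item):
--             if c == ",":
--                 if cur:
--                     ids.append("".join(cur))
--                 cur = []
--                 pend = []
--             elif c.isspace():
--                 if cur:
--                     pend.append(c)
--             else:
--                 cur += pend
--                 cur.append(c)
--                 pend = []
--         if cur:
--             ids.append("".join(cur))
--     return ids
-- ===== Notes on version B (the rewrite author's own statement) =====
-- stated objective: alternative
-- what changed: Replaces per-item split(',') plus per-part strip() with a single character-level state machine that accumulates each token directly (current-token buffer plus pending-whitespace buffer), so tokens are emitted on commas/item ends and whitespace never needs stripping afterwards.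
import Mathlib
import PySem

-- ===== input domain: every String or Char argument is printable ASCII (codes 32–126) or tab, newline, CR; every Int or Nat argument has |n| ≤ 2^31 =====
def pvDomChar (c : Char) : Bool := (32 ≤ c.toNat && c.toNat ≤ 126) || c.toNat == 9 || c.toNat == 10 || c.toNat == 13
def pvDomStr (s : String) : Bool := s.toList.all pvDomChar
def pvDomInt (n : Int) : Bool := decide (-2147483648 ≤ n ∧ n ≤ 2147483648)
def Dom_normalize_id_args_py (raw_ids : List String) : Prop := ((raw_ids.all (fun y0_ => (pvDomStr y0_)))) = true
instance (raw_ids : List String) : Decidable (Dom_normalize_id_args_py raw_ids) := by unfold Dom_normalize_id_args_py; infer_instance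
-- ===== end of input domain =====

-- B replaces A's split/strip per-item loop by a single character-level state machine
-- that builds each token directly (objective: alternative decomposition, same cost).


-- ===== PORT A =====
def normalize_id_args_py (raw_ids : List String) : List String :=
  raw_ids.foldl (fun ids item =>
    ((PySem.Str.split? item ",").getD []).foldl
      (fun ids part =>
        let part := PySem.Str.strip part
        if part ≠ "" then ids ++ [part] else ids) ids) []

-- ===== PORT B =====
-- one step of the character state machine: state = (emitted ids, current token, pending whitespace)
def pvStepB (st : List String × List Char × List Char) (c : Char) :
    List String × List Char × List Char :=
  if c = ',' then
    ((if st.2.1 ≠ [] then st.1 ++ [String.ofList st.2.1] else st.1), [], [])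
  else if PySem.Chars.isspace c then
    (st.1, st.2.1, if st.2.1 ≠ [] then st.2.2 ++ [c] else st.2.2)
  else
    (st.1, st.2.1 ++ st.2.2 ++ [c], [])

def pvFlushB (st : List String × List Char × List Char) : List String :=
  if st.2.1 ≠ [] then st.1 ++ [String.ofList st.2.1] else st.1

def normalize_id_args_py_alt (raw_ids : List String) : List String :=
  raw_ids.foldl (fun ids item => pvFlushB (item.toList.foldl pvStepB (ids, [], []))) []

-- ===== PRECONDITION & SPEC =====
def Spec_normalize_id_args_py (raw_ids : List String) (out : List String) : Prop := out = normalize_id_args_py_alt raw_ids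
instance (raw_ids : List String) (out : List String) : Decidable (Spec_normalize_id_args_py raw_ids out) := by unfold Spec_normalize_id_args_py; infer_instance

-- ===== CLAIM =====
def Claim_equal_normalize_id_args_py : Prop := ∀ (raw_ids : List String), Dom_normalize_id_args_py raw_ids → Spec_normalize_id_args_py raw_ids (normalize_id_args_py raw_ids)

-- ===== LEMMAS AND PROOFS =====

-- simple structural model of splitting on ','
def mySplit : List Char → List (List Char)
  | [] => [[]]
  | c :: rest =>
    if c = ',' then [] :: mySplit rest
    else match mySplit rest with
      | [] => [[c]]
      | h :: t => (c :: h) :: t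

def prependFirst (pre : List Char) : List (List Char) → List (List Char)
  | [] => [pre]
  | h :: t => (pre ++ h) :: t

lemma mySplit_ne_nil (cs : List Char) : mySplit cs ≠ [] := by
  cases cs with
  | nil => simp [mySplit]
  | cons c rest =>
    simp only [mySplit]
    split_ifs
    · simp
    · cases h : mySplit rest <;> simp

lemma mySplit_cons (c : Char) (rest : List Char) :
    mySplit (c :: rest) = if c = ',' then [] :: mySplit rest
      else prependFirst [c] (mySplit rest) := by
  simp only [mySplit]
  split_ifs with h
  · rfl
  · cases h' : mySplit rest <;> simp [prependFirst]

lemma prependFirst_prependFirst (a b : List Char) (l : List (List Char)) :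
    prependFirst a (prependFirst b l) = prependFirst (a ++ b) l := by
  cases l <;> simp [prependFirst]

lemma prependFirst_nil (l : List (List Char)) (h : l ≠ []) : prependFirst [] l = l := by
  cases l with
  | nil => exact absurd rfl h
  | cons a b => simp [prependFirst]

lemma splitOn_go_comma (fuel : Nat) :
    ∀ (l cur : List Char) (acc : List (List Char)), l.length < fuel →
    PySem.Chars.splitOn.go [','] fuel l cur acc
      = acc.reverse ++ prependFirst cur.reverse (mySplit l) := by
  induction fuel with
  | zero => intro l cur acc h; omega
  | succ fuel ih =>
    intro l cur acc h
    cases l with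
    | nil =>
      simp [PySem.Chars.splitOn.go, mySplit, prependFirst]
    | cons c rest =>
      simp only [PySem.Chars.splitOn.go]
      by_cases hc : c = ','
      · subst hc
        have hpre : List.isPrefixOf [','] (',' :: rest) = true := by
          simp [List.isPrefixOf]
        rw [if_pos hpre]
        have hih := ih rest [] (cur.reverse :: acc) (by simpa using Nat.lt_of_succ_lt_succ h)
        simp only [List.reverse_nil] at hih
        rw [prependFirst_nil _ (mySplit_ne_nil rest)] at hih
        simp only [List.length_cons, List.drop, List.length_nil] at hih ⊢
        rw [hih, mySplit_cons, if_pos rfl]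
        simp [prependFirst]
      · have hpre : List.isPrefixOf [','] (c :: rest) = false := by
          simp only [List.isPrefixOf, Bool.and_eq_false_iff, beq_eq_false_iff_ne, ne_eq]
          exact Or.inl fun h' => hc h'.symm
        rw [if_neg (by simp [hpre])]
        have := ih rest (c :: cur) acc (by simpa using Nat.lt_of_succ_lt_succ h)
        rw [this, mySplit_cons, if_neg hc, prependFirst_prependFirst]
        simp

lemma splitOn_comma (cs : List Char) :
    PySem.Chars.splitOn cs [','] = mySplit cs := by
  have := splitOn_go_comma (cs.length + 1) cs [] [] (by omega)
  simp only [List.reverse_nil] at this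
  rw [prependFirst_nil _ (mySplit_ne_nil cs)] at this
  simpa [PySem.Chars.splitOn] using this

-- the per-item part list, as strings
def partsOf (s : String) : List String := (mySplit s.toList).map String.ofList

lemma split_getD (s : String) :
    (PySem.Str.split? s ",").getD [] = partsOf s := by
  simp [PySem.Str.split?, PySem.Chars.split?, splitOn_comma, partsOf]

lemma A_eq_flatMap (raw_ids : List String) :
    normalize_id_args_py raw_ids
      = raw_ids.flatMap (fun item => (((partsOf item).map PySem.Str.strip).filter (fun p => p ≠ ""))) := by
  unfold normalize_id_args_py
  have inner : ∀ (item : String) (ids : List String),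
      ((PySem.Str.split? item ",").getD []).foldl
        (fun ids part =>
          let part := PySem.Str.strip part
          if part ≠ "" then ids ++ [part] else ids) ids
      = ids ++ (((partsOf item).map PySem.Str.strip).filter (fun p => p ≠ "")) := by
    intro item ids
    rw [split_getD]
    have := PySem.List.foldl_append_if (fun part => decide (PySem.Str.strip part ≠ ""))
      PySem.Str.strip (partsOf item) ids
    simp only [decide_eq_true_eq] at this
    rw [this, List.filter_map]
    rfl
  calc raw_ids.foldl (fun ids item =>
        ((PySem.Str.split? item ",").getD []).foldl
          (fun ids part =>
            let part := PySem.Str.strip part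
            if part ≠ "" then ids ++ [part] else ids) ids) []
      = raw_ids.foldl (fun ids item =>
          ids ++ (((partsOf item).map PySem.Str.strip).filter (fun p => p ≠ ""))) [] := by
        apply PySem.List.foldl_congr_mem
        intro ids item _
        exact inner item ids
    _ = _ := by
        simpa using PySem.List.foldl_append_eq_flatMap
          (fun item => (((partsOf item).map PySem.Str.strip).filter (fun p => p ≠ ""))) raw_ids []

-- ---- B-side characterisation: the machine computes strip of each comma segment ----

-- first token produced by the machine from mid-token state (cur, pend) and remaining segment h
def firstTok (cur pend h : List Char) : List Char :=
  if cur = [] then PySem.Chars.strip h else cur ++ PySem.Chars.rstrip (pend ++ h)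

def tokList (cur pend : List Char) : List (List Char) → List (List Char)
  | [] => []
  | h :: t => firstTok cur pend h :: t.map PySem.Chars.strip

lemma rstrip_all_ws (l : List Char) (h : l.all PySem.Chars.isspace) :
    PySem.Chars.rstrip l = [] := by
  simp only [PySem.Chars.rstrip, List.reverse_eq_nil_iff]
  rw [List.dropWhile_eq_nil_iff]
  intro c hc
  exact List.all_eq_true.1 h c (List.mem_reverse.1 hc)

lemma dropWhile_append_nonmatch {p : Char → Bool} (c : Char) (hc : p c = false)
    (a b : List Char) :
    List.dropWhile p (a ++ c :: b) = List.dropWhile p a ++ c :: b := by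
  induction a with
  | nil => simp [hc]
  | cons x a' ih =>
    simp only [List.cons_append, List.dropWhile_cons]
    by_cases hx : p x = true
    · simp [hx, ih]
    · simp [hx]

lemma rstrip_append_nonspace (c : Char) (hc : PySem.Chars.isspace c = false)
    (l m : List Char) :
    PySem.Chars.rstrip (l ++ c :: m) = l ++ c :: PySem.Chars.rstrip m := by
  simp only [PySem.Chars.rstrip, List.reverse_append, List.reverse_cons]
  rw [show (m.reverse ++ [c] ++ l.reverse : List Char) = m.reverse ++ c :: l.reverse by simp,
    dropWhile_append_nonmatch c hc]
  simp

lemma strip_cons_ws (c : Char) (hc : PySem.Chars.isspace c = true) (l : List Char) :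
    PySem.Chars.strip (c :: l) = PySem.Chars.strip l := by
  simp [PySem.Chars.strip, PySem.Chars.lstrip, hc]

lemma strip_cons_nonspace (c : Char) (hc : PySem.Chars.isspace c = false) (l : List Char) :
    PySem.Chars.strip (c :: l) = c :: PySem.Chars.rstrip l := by
  simp only [PySem.Chars.strip, PySem.Chars.lstrip, List.dropWhile_cons, hc]
  simpa using rstrip_append_nonspace c hc [] l

-- the main machine invariant
lemma runB (cs : List Char) :
    ∀ (ids : List String) (cur pend : List Char),
      pend.all PySem.Chars.isspace → (cur = [] → pend = []) →
      pvFlushB (cs.foldl pvStepB (ids, cur, pend))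
        = ids ++ ((tokList cur pend (mySplit cs)).filter (fun p => p ≠ [])).map String.ofList := by
  induction cs with
  | nil =>
    intro ids cur pend hws hcp
    by_cases hc : cur = []
    · simp [hc, pvFlushB, mySplit, tokList, firstTok, PySem.Chars.strip, PySem.Chars.lstrip,
        PySem.Chars.rstrip]
    · simp only [List.foldl_nil, pvFlushB, mySplit, tokList, firstTok, if_neg hc,
        rstrip_all_ws pend hws, List.append_nil, List.map_nil, ne_eq]
      simp [hc]
  | cons c cs' ih =>
    intro ids cur pend hws hcp
    by_cases hcomma : c = ','
    · subst hcomma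
      rw [List.foldl_cons,
        show pvStepB (ids, cur, pend) ','
          = ((if cur ≠ [] then ids ++ [String.ofList cur] else ids), [], []) from by
            simp [pvStepB]]
      rw [ih _ [] [] (by simp) (by simp)]
      rw [mySplit_cons, if_pos rfl]
      cases h' : mySplit cs' with
      | nil => exact absurd h' (mySplit_ne_nil cs')
      | cons h t =>
        simp only [tokList, firstTok]
        by_cases hc : cur = []
        · simp [hc, PySem.Chars.strip, PySem.Chars.lstrip, PySem.Chars.rstrip]
        · simp only [ne_eq, if_neg hc,
            rstrip_all_ws pend hws, List.append_nil]
          have hstrip : PySem.Chars.strip ([] : List Char) = [] := by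
            simp [PySem.Chars.strip, PySem.Chars.lstrip, PySem.Chars.rstrip]
          simp [hc, List.filter_cons]
    · by_cases hsp : PySem.Chars.isspace c = true
      · rw [List.foldl_cons,
          show pvStepB (ids, cur, pend) c
            = (ids, cur, if cur ≠ [] then pend ++ [c] else pend) from by
              simp [pvStepB, hcomma, hsp]]
        rw [mySplit_cons, if_neg hcomma]
        cases h' : mySplit cs' with
        | nil => exact absurd h' (mySplit_ne_nil cs')
        | cons h t =>
          simp only [prependFirst]
          by_cases hc : cur = []
          · have hp : pend = [] := hcp hc
            subst hp
            rw [show (if cur ≠ [] then ([] : List Char) ++ [c] else []) = [] by simp [hc]]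
            rw [ih _ cur [] (by simp) (fun _ => rfl)]
            simp only [h', tokList, firstTok, hc, if_true, List.singleton_append,
              List.nil_append]
            rw [strip_cons_ws c hsp]
          · rw [show (if cur ≠ [] then pend ++ [c] else pend) = pend ++ [c] by simp [hc]]
            rw [ih _ cur (pend ++ [c]) (by simp [List.all_append, hws, hsp])
              (fun h0 => absurd h0 hc)]
            simp only [h', tokList, firstTok, if_neg hc, List.append_assoc, List.cons_append,
              List.nil_append]
      · have hsp' : PySem.Chars.isspace c = false := by simpa using hsp
        rw [List.foldl_cons,
          show pvStepB (ids, cur, pend) c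
            = (ids, cur ++ pend ++ [c], []) from by
              simp [pvStepB, hcomma, hsp']]
        rw [mySplit_cons, if_neg hcomma]
        cases h' : mySplit cs' with
        | nil => exact absurd h' (mySplit_ne_nil cs')
        | cons h t =>
          simp only [prependFirst]
          rw [ih _ (cur ++ pend ++ [c]) [] (by simp) (by simp)]
          simp only [h', tokList, firstTok]
          rw [if_neg (by simp)]
          by_cases hc : cur = []
          · have hp : pend = [] := hcp hc
            subst hp; subst hc
            simp only [List.nil_append, if_true, List.singleton_append]
            rw [strip_cons_nonspace c hsp']
          · rw [if_neg hc]
            rw [show (pend ++ ([c] ++ h) : List Char) = pend ++ c :: h by simp,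
              rstrip_append_nonspace c hsp' pend h]
            simp

-- bridge: Str.strip on String.ofList
lemma strip_ofList (l : List Char) :
    PySem.Str.strip (String.ofList l) = String.ofList (PySem.Chars.strip l) := by
  rw [← String.toList_inj, String.toList_ofList]
  have := PySem.Str.toList_strip (String.ofList l)
  rwa [String.toList_ofList] at this

lemma ofList_ne_empty (l : List Char) : (String.ofList l ≠ "") ↔ l ≠ [] := by
  rw [show ("" : String) = String.ofList [] from rfl, ne_eq, String.ofList_inj]

lemma map_strip_filter (l : List (List Char)) :
    ((l.map String.ofList).map PySem.Str.strip).filter (fun p => p ≠ "")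
      = ((l.map PySem.Chars.strip).filter (fun p => p ≠ [])).map String.ofList := by
  induction l with
  | nil => rfl
  | cons x xs ih =>
    simp only [List.map_cons, List.filter_cons, strip_ofList]
    by_cases h : PySem.Chars.strip x = []
    · simp only [h, decide_eq_true_eq]
      rw [if_neg (by simp), if_neg (by simp)]
      exact ih
    · rw [if_pos (by simpa using (ofList_ne_empty _).2 h), if_pos (by simpa using h),
        List.map_cons]
      exact congrArg (List.cons _) ih

lemma B_item (ids : List String) (item : String) :
    pvFlushB (item.toList.foldl pvStepB (ids, [], []))
      = ids ++ ((partsOf item).map PySem.Str.strip).filter (fun p => p ≠ "") := by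
  rw [runB item.toList ids [] [] (by simp) (fun _ => rfl)]
  congr 1
  cases h' : mySplit item.toList with
  | nil => exact absurd h' (mySplit_ne_nil item.toList)
  | cons h t =>
    simp only [tokList, firstTok, if_true, partsOf, h']
    rw [show (PySem.Chars.strip h :: t.map PySem.Chars.strip)
        = (h :: t).map PySem.Chars.strip from rfl]
    exact (map_strip_filter (h :: t)).symm

-- ===== VERDICT =====
theorem normalize_id_args_py_spec : Claim_equal_normalize_id_args_py := by
  intro raw_ids _
  unfold Spec_normalize_id_args_py normalize_id_args_py_alt
  rw [A_eq_flatMap]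
  symm
  calc raw_ids.foldl (fun ids item => pvFlushB (item.toList.foldl pvStepB (ids, [], []))) []
      = raw_ids.foldl (fun ids item =>
          ids ++ (((partsOf item).map PySem.Str.strip).filter (fun p => p ≠ ""))) [] := by
        apply PySem.List.foldl_congr_mem
        intro ids item _
        exact B_item ids item
    _ = _ := by
        simpa using (PySem.List.foldl_append_eq_flatMap
          (fun item => (((partsOf item).map PySem.Str.strip).filter (fun p => p ≠ ""))) raw_ids [])
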